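-- pv_equiv track=rewrite | github.com/mimix23179/ButterflyUI | butterflyui/sdk/python/packages/butterflyui/src/butterflyui/stylesheet.py | _iter_rule_blocks
-- ===== SOURCE A (Python) =====
-- def _iter_rule_blocks(source: str) -> list[tuple[str, str]]:
--     blocks: list[tuple[str, str]] = []
--     length = len(source)
--     index = 0
--     while index < length:
--         while index < length and source[index].isspace():
--             index += 1
--         if index >= length:
--             break
--         selector_start = index
--         while index < length and source[index] != "{":
--             index += 1
--         if index >= length:
--             break
--         selector = source[selector_start:index].strip()
--         index += 1
--         body_start = index
--         depth = 1
--         quote: str | None = None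
--         escape = False
--         while index < length and depth > 0:
--             char = source[index]
--             if quote is not None:
--                 if escape:
--                     escape = False
--                 elif char == "\\":
--                     escape = True
--                 elif char == quote:
--                     quote = None
--                 index += 1
--                 continue
--             if char in {'"', "'"}:
--                 quote = char
--                 index += 1
--                 continue
--             if char == "{":
--                 depth += 1
--             elif char == "}":
--                 depth -= 1
--             index += 1
--         if not selector:
--             continue
--         body = source[body_start : index - 1].strip()
--         if body:
--             blocks.append((selector, body))
--     return blocks
-- ===== SOURCE B (Python) =====
-- def _iter_rule_blocks(source: str) -> list[tuple[str, str]]: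
--     SEEK, SELECTOR, BODY = range(3)
--     blocks: list[tuple[str, str]] = []
--     mode = SEEK
--     sel_buf: list[str] = []
--     selector = ""
--     body_buf: list[str] = []
--     depth = 0
--     quote: str | None = None
--     escape = False
--     for char in source:
--         if mode == SEEK:
--             if char.isspace():
--                 continue
--             if char == "{":
--                 selector, body_buf, depth, quote, escape = "", [], 1, None, False
--                 mode = BODY
--             else:
--                 sel_buf = [char]
--                 mode = SELECTOR
--         elif mode == SELECTOR:
--             if char == "{":
--                 selector = "".join(sel_buf).strip()
--                 body_buf, depth, quote, escape = [], 1, None, False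
--                 mode = BODY
--             else:
--                 sel_buf.append(char)
--         else:  # BODY
--             if quote is not None:
--                 if escape:
--                     escape = False
--                 elif char == "\\":
--                     escape = True
--                 elif char == quote:
--                     quote = None
--                 body_buf.append(char)
--             elif char in ('"', "'"):
--                 quote = char
--                 body_buf.append(char)
--             elif char == "{":
--                 depth += 1
--                 body_buf.append(char)
--             elif char == "}":
--                 depth -= 1
--                 if depth == 0:
--                     body = "".join(body_buf).strip()
--                     if selector and body:
--                         blocks.append((selector, body))
--                     mode = SEEK
--                 else:
--                     body_buf.append(char)
--             else:
--                 body_buf.append(char)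
--     if mode == BODY:
--         # end of input inside a block: close the unterminated block (CSS-style recovery)
--         body = "".join(body_buf).strip()
--         if selector and body:
--             blocks.append((selector, body))
--     return blocks
-- ===== Notes on version B (the rewrite author's own statement) =====
-- stated objective: alternative
-- what changed: Replaces A's outer loop with three nested inner while-loops (whitespace skip, selector scan, body scan) by a single flat pass over the characters driven by an explicit mode state machine (seek / in-selector / in-body) with selector and body buffers; an unterminated final block is closed at end of input instead of A's truncating slice.
-- intended difference: On sources that end inside an unterminated brace block with a nonempty selector whose last character is not whitespace, A's slice source[body_start:index-1] silently cuts off the body's final character (e.g. 'a{x: y' -> [('a','x:')]), while B closes the unterminated block at end of input and returns the full stripped body ([('a','x: y')]), which is the intended CSS-style recovery. — e.g. on _iter_rule_blocks("a{x: y"): A returns [("a", "x:")], B returns [("a", "x: y")]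
import Mathlib
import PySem

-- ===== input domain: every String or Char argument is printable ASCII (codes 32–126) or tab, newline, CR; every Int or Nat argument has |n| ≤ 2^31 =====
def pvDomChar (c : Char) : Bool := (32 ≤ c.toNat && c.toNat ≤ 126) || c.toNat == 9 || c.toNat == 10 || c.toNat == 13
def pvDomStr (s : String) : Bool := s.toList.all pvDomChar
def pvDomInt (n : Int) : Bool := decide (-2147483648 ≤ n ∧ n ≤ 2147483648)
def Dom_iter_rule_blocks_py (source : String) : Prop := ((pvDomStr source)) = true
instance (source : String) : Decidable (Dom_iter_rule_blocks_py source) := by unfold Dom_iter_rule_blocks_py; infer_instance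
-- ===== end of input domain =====

-- B replaces A's nested inner while-loops by a single flat pass with an explicit mode
-- state machine (seek / in-selector / in-body); B closes an unterminated final block at
-- end of input where A's slice drops the body's last character (stated in D_ below).

-- ===== PORT A =====
-- A's inner loop `while index < length and source[index].isspace(): index += 1`
def aSkip : List Char → List Char
  | [] => []
  | c :: r => if PySem.Chars.isspace c then aSkip r else c :: r

-- A's inner loop `while index < length and source[index] != "{": index += 1`
-- returns (scanned selector chars, rest of the input starting at '{' if found)
def aSel : List Char → List Char × List Char
  | [] => ([], [])
  | c :: r =>
    if c = '{' then ([], c :: r)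
    else
      let p := aSel r
      (c :: p.1, p.2)

-- A's body loop `while index < length and depth > 0: …`
-- returns (consumed chars, rest); A's body slice source[body_start:index-1]
-- is the consumed chars without the last one.
def aBody : List Char → Int → Option Char → Bool → List Char × List Char
  | [], _, _, _ => ([], [])
  | c :: r, depth, q, e =>
    if depth ≤ 0 then ([], c :: r)
    else
      match q with
      | some qc =>
        let qe : Option Char × Bool :=
          if e then (some qc, false)
          else if c = '\\' then (some qc, true)
          else if c = qc then (none, e)
          else (some qc, e)
        let p := aBody r depth qe.1 qe.2
        (c :: p.1, p.2)
      | none =>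
        if c = '"' ∨ c = '\'' then
          let p := aBody r depth (some c) e
          (c :: p.1, p.2)
        else
          let d' := if c = '{' then depth + 1 else if c = '}' then depth - 1 else depth
          let p := aBody r d' none e
          (c :: p.1, p.2)

-- length facts cited by aLoop's decreasing_by
theorem aSkip_len (cs : List Char) : (aSkip cs).length ≤ cs.length := by
  induction cs with
  | nil => simp [aSkip]
  | cons c r ih =>
    simp only [aSkip]
    split
    · simp only [List.length_cons]; omega
    · simp

theorem aSel_len (cs : List Char) : (aSel cs).2.length ≤ cs.length := by
  induction cs with
  | nil => simp [aSel]
  | cons c r ih =>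
    simp only [aSel]
    split
    · simp
    · simp only [List.length_cons]; omega

theorem aBody_len (cs : List Char) : ∀ (d : Int) (q : Option Char) (e : Bool),
    (aBody cs d q e).2.length ≤ cs.length := by
  induction cs with
  | nil => intro d q e; simp [aBody]
  | cons c r ih =>
    intro d q e
    cases q with
    | some qc =>
      simp only [aBody]
      split
      · simp
      · simpa using Nat.le_succ_of_le (ih _ _ _)
    | none =>
      simp only [aBody]
      split
      · simp
      · split
        · simpa using Nat.le_succ_of_le (ih _ _ _)
        · simpa using Nat.le_succ_of_le (ih _ _ _)

-- A's outer `while index < length:` loop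
def aLoop (cs : List Char) : List (String × String) :=
  let cs1 := aSkip cs
  if _h1 : cs1 = [] then []
  else
    let p := aSel cs1
    if _h2 : p.2 = [] then []
    else
      let selector := PySem.Chars.strip p.1
      let b := aBody p.2.tail 1 none false
      if selector = [] then aLoop b.2
      else
        let body := PySem.Chars.strip b.1.dropLast
        if body = [] then aLoop b.2
        else (String.ofList selector, String.ofList body) :: aLoop b.2
termination_by cs.length
decreasing_by
  all_goals
    have hb := aBody_len (aSel (aSkip cs)).2.tail 1 none false
    have hs := aSel_len (aSkip cs)
    have hk := aSkip_len cs
    have _h1' : 0 < (aSkip cs).length := List.length_pos_iff.mpr _h1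
    have h2' : 0 < (aSel (aSkip cs)).2.length := List.length_pos_iff.mpr _h2
    simp only [List.length_tail] at *
    omega

def iter_rule_blocks_py (source : String) : List (String × String) :=
  aLoop source.toList

-- ===== PORT B =====
-- the explicit state of B's single flat pass
inductive BMode where
  | seek
  | insel (acc : List Char)
  | inbody (sel : List Char) (buf : List Char) (depth : Int) (q : Option Char) (e : Bool)

-- `if selector and body: blocks.append((selector, body))`
def bEmit (sel : List Char) (body : List Char) : List (String × String) :=
  if sel ≠ [] ∧ body ≠ [] then [(String.ofList sel, String.ofList body)] else []

-- B's single `for char in source:` loop; at end of input an unterminated block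
-- is closed and emitted (the `if mode == BODY:` epilogue of Source B)
def bStep : BMode → List Char → List (String × String)
  | .seek, [] => []
  | .insel _, [] => []
  | .inbody sel buf _ _ _, [] => bEmit sel (PySem.Chars.strip buf)
  | .seek, c :: r =>
    if PySem.Chars.isspace c then bStep .seek r
    else if c = '{' then bStep (.inbody [] [] 1 none false) r
    else bStep (.insel [c]) r
  | .insel acc, c :: r =>
    if c = '{' then bStep (.inbody (PySem.Chars.strip acc) [] 1 none false) r
    else bStep (.insel (acc ++ [c])) r
  | .inbody sel buf depth q e, c :: r =>
    match q with
    | some qc =>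
      let qe : Option Char × Bool :=
        if e then (some qc, false)
        else if c = '\\' then (some qc, true)
        else if c = qc then (none, e)
        else (some qc, e)
      bStep (.inbody sel (buf ++ [c]) depth qe.1 qe.2) r
    | none =>
      if c = '"' ∨ c = '\'' then bStep (.inbody sel (buf ++ [c]) depth (some c) e) r
      else if c = '{' then bStep (.inbody sel (buf ++ [c]) (depth + 1) none e) r
      else if c = '}' then
        if depth - 1 = 0 then bEmit sel (PySem.Chars.strip buf) ++ bStep .seek r
        else bStep (.inbody sel (buf ++ [c]) (depth - 1) none e) r
      else bStep (.inbody sel (buf ++ [c]) depth none e) r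

def iter_rule_blocks_py_alt (source : String) : List (String × String) :=
  bStep .seek source.toList

-- ===== PRECONDITION & SPEC =====
-- D_'s scanner: one flat fold over the characters with a six-field state
-- (inBody, selector-nonempty-seen, last-char-nonspace, depth, open quote, escape);
-- it classifies only where a brace/quote scan of the input ends and builds no output.
def dStep (st : Bool × Bool × Bool × Int × Option Char × Bool) (c : Char) :
    Bool × Bool × Bool × Int × Option Char × Bool :=
  match st with
  | (false, seen, _, _, _, _) =>
    if c == '{' then (true, seen, false, 1, none, false)
    else (false, seen || !PySem.Chars.isspace c, false, 0, none, false)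
  | (true, sne, _, depth, some qc, esc) =>
    (true, sne, !PySem.Chars.isspace c, depth,
      if !esc && !(c == '\\') && c == qc then none else some qc, !esc && c == '\\')
  | (true, sne, _, depth, none, _) =>
    if c == '}' && depth == 1 then (false, false, false, 0, none, false)
    else
      (true, sne, !PySem.Chars.isspace c,
        depth + (if c == '{' then 1 else if c == '}' then -1 else 0),
        if c == '"' || c == '\'' then some c else none, false)

def dJudge (st : Bool × Bool × Bool × Int × Option Char × Bool) : Bool :=
  st.1 && st.2.1 && st.2.2.1

-- On sources that end inside an unterminated brace block with a nonempty selector whose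
-- last character is not whitespace, A's slice source[body_start:index-1] cuts off the
-- body's final character, while B closes the unterminated block at end of input and
-- returns the full stripped body — the intended CSS-style recovery.
def D_iter_rule_blocks_py (source : String) : Prop :=
  dJudge (source.toList.foldl dStep (false, false, false, 0, none, false)) = true
instance (source : String) : Decidable (D_iter_rule_blocks_py source) := by
  unfold D_iter_rule_blocks_py; infer_instance

def Spec_iter_rule_blocks_py (source : String) (out : List (String × String)) : Prop :=
  ¬ D_iter_rule_blocks_py source → out = iter_rule_blocks_py_alt source
instance (source : String) (out : List (String × String)) : Decidable (Spec_iter_rule_blocks_py source out) := by unfold Spec_iter_rule_blocks_py; infer_instance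

def pvDiffWitness_iter_rule_blocks_py : String := "a{x: y"
def pvDiffWitnessOut_iter_rule_blocks_py : (List (String × String)) × (List (String × String)) :=
  ([("a", "x:")], [("a", "x: y")])

-- ===== CLAIM (what is proved, stated in full; the proofs are below) =====
def Claim_unchanged_iter_rule_blocks_py : Prop := ∀ (source : String), Dom_iter_rule_blocks_py source → Spec_iter_rule_blocks_py source (iter_rule_blocks_py source)
def Claim_changed_iter_rule_blocks_py : Prop := Dom_iter_rule_blocks_py (pvDiffWitness_iter_rule_blocks_py) ∧ D_iter_rule_blocks_py (pvDiffWitness_iter_rule_blocks_py) ∧ iter_rule_blocks_py (pvDiffWitness_iter_rule_blocks_py) = pvDiffWitnessOut_iter_rule_blocks_py.1 ∧ iter_rule_blocks_py_alt (pvDiffWitness_iter_rule_blocks_py) = pvDiffWitnessOut_iter_rule_blocks_py.2 ∧ pvDiffWitnessOut_iter_rule_blocks_py.1 ≠ pvDiffWitnessOut_iter_rule_blocks_py.2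

def Claim_exact_iter_rule_blocks_py : Prop := ∀ (source : String), Dom_iter_rule_blocks_py source → D_iter_rule_blocks_py source → iter_rule_blocks_py source ≠ iter_rule_blocks_py_alt source

-- ===== LEMMAS AND PROOFS =====

-- does A's body loop run off the end of the input with the block still open?
def aBodyEOF : List Char → Int → Option Char → Bool → Bool
  | [], d, _, _ => decide (0 < d)
  | c :: r, d, q, e =>
    if d ≤ 0 then false
    else
      match q with
      | some qc =>
        let qe : Option Char × Bool :=
          if e then (some qc, false)
          else if c = '\\' then (some qc, true)
          else if c = qc then (none, e)
          else (some qc, e)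
        aBodyEOF r d qe.1 qe.2
      | none =>
        if c = '"' ∨ c = '\'' then aBodyEOF r d (some c) e
        else if c = '{' then aBodyEOF r (d + 1) none e
        else if c = '}' then aBodyEOF r (d - 1) none e
        else aBodyEOF r d none e

-- tracks the scanner's last-char-nonspace flag over a run of consumed characters
def lastFlag (lns : Bool) : List Char → Bool
  | [] => lns
  | c :: r => lastFlag (!PySem.Chars.isspace c) r

theorem aBody_nonpos (cs : List Char) (d : Int) (q : Option Char) (e : Bool) (hd : d ≤ 0) :
    aBody cs d q e = ([], cs) := by
  cases cs with
  | nil => simp [aBody]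
  | cons c r => simp [aBody, hd]

theorem aBodyEOF_nonpos (cs : List Char) (d : Int) (q : Option Char) (e : Bool) (hd : d ≤ 0) :
    aBodyEOF cs d q e = false := by
  cases cs with
  | nil => simp [aBodyEOF]; omega
  | cons c r => simp [aBodyEOF, hd]

theorem aBodyEOF_consumes (cs : List Char) : ∀ (d : Int) (q : Option Char) (e : Bool),
    aBodyEOF cs d q e = true → aBody cs d q e = (cs, []) := by
  induction cs with
  | nil => intro d q e _; simp [aBody]
  | cons c r ih =>
    intro d q e h
    by_cases hd : d ≤ 0
    · rw [aBodyEOF_nonpos _ _ _ _ hd] at h; exact absurd h (by simp)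
    · cases q with
      | some qc =>
        simp only [aBodyEOF, hd, if_false] at h
        simp only [aBody, hd, if_false]
        split_ifs at h with h1 h2 h3 <;> simp_all [ih _ _ _ h]
      | none =>
        simp only [aBodyEOF, hd, if_false] at h
        simp only [aBody, hd, if_false]
        split_ifs at h with h1 h2 h3 <;> simp_all [ih _ _ _ h]

-- strip facts used to compare A's truncating slice with B's full buffer
theorem strip_cons_space (c : Char) (x : List Char) (h : PySem.Chars.isspace c = true) :
    PySem.Chars.strip (c :: x) = PySem.Chars.strip x := by
  simp [PySem.Chars.strip, PySem.Chars.lstrip, List.dropWhile, h]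

theorem rstrip_append_space (c : Char) (y : List Char) (h : PySem.Chars.isspace c = true) :
    PySem.Chars.rstrip (y ++ [c]) = PySem.Chars.rstrip y := by
  simp [PySem.Chars.rstrip, h]

theorem strip_append_space (c : Char) (x : List Char) (h : PySem.Chars.isspace c = true) :
    PySem.Chars.strip (x ++ [c]) = PySem.Chars.strip x := by
  unfold PySem.Chars.strip PySem.Chars.lstrip
  rw [List.dropWhile_append]
  split
  · next he =>
    have : List.dropWhile PySem.Chars.isspace x = [] := by
      simpa [List.isEmpty_iff] using he
    simp [this, List.dropWhile, h, PySem.Chars.rstrip]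
  · exact rstrip_append_space c _ h

theorem rstrip_append_nonspace (y : List Char) (c : Char) (h : PySem.Chars.isspace c = false) :
    PySem.Chars.rstrip (y ++ [c]) = y ++ [c] := by
  simp [PySem.Chars.rstrip, h]

theorem strip_append_nonspace (c : Char) (x : List Char) (h : PySem.Chars.isspace c = false) :
    PySem.Chars.strip (x ++ [c]) ≠ [] := by
  unfold PySem.Chars.strip PySem.Chars.lstrip
  rw [List.dropWhile_append]
  split
  · simp [List.dropWhile, h, PySem.Chars.rstrip]
  · rw [rstrip_append_nonspace _ _ h]
    simp

theorem seen_append (acc : List Char) (c : Char) :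
    ((!(PySem.Chars.strip acc).isEmpty) || !PySem.Chars.isspace c)
      = !(PySem.Chars.strip (acc ++ [c])).isEmpty := by
  by_cases h : PySem.Chars.isspace c = true
  · rw [strip_append_space c acc h]
    simp [h]
  · have h' : PySem.Chars.isspace c = false := by simp_all
    have hne := strip_append_nonspace c acc h'
    simp [h', hne]

theorem lastFlag_concat (ys : List Char) : ∀ (b : Bool) (c : Char),
    lastFlag b (ys ++ [c]) = !PySem.Chars.isspace c := by
  induction ys with
  | nil => intro b c; simp [lastFlag]
  | cons y ys ih => intro b c; simpa [lastFlag] using ih _ c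

theorem strip_dropLast_of_lastFlag (cs : List Char) (b : Bool)
    (h : lastFlag b cs = false) :
    PySem.Chars.strip cs.dropLast = PySem.Chars.strip cs := by
  rcases List.eq_nil_or_concat cs with hnil | ⟨ys, c, rfl⟩
  · simp [hnil]
  · simp only [List.concat_eq_append] at h ⊢
    rw [lastFlag_concat] at h
    have hc : PySem.Chars.isspace c = true := by
      cases hx : PySem.Chars.isspace c <;> simp_all
    rw [List.dropLast_concat, strip_append_space c ys hc]

theorem rstrip_len_le (l : List Char) : (PySem.Chars.rstrip l).length ≤ l.length := by
  have := List.length_dropWhile_le PySem.Chars.isspace l.reverse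
  simp [PySem.Chars.rstrip]
  simpa using this

theorem strip_concat_nonspace (ys : List Char) (c : Char) (h : PySem.Chars.isspace c = false) :
    PySem.Chars.strip (ys ++ [c]) = PySem.Chars.lstrip ys ++ [c] := by
  unfold PySem.Chars.strip PySem.Chars.lstrip
  rw [List.dropWhile_append]
  split
  · next he =>
    have h0 : List.dropWhile PySem.Chars.isspace ys = [] := by
      simpa [List.isEmpty_iff] using he
    simp [List.dropWhile, h, PySem.Chars.rstrip, h0]
  · rw [rstrip_append_nonspace _ _ h]

-- a body whose last character is non-whitespace strips strictly longer than its dropLast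
theorem strip_strict (cs : List Char) (h : lastFlag false cs = true) :
    PySem.Chars.strip cs.dropLast ≠ PySem.Chars.strip cs ∧ PySem.Chars.strip cs ≠ [] := by
  rcases List.eq_nil_or_concat cs with hnil | ⟨ys, c, rfl⟩
  · subst hnil; simp [lastFlag] at h
  · simp only [List.concat_eq_append] at h ⊢
    rw [lastFlag_concat] at h
    have hc : PySem.Chars.isspace c = false := by
      cases hx : PySem.Chars.isspace c <;> simp_all
    rw [List.dropLast_concat, strip_concat_nonspace ys c hc]
    constructor
    · intro he
      have hlen := congrArg List.length he
      have h1 : (PySem.Chars.strip ys).length ≤ (PySem.Chars.lstrip ys).length := by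
        unfold PySem.Chars.strip
        exact rstrip_len_le _
      simp at hlen
      omega
    · simp

-- A's whitespace skip changes neither the stripped selector nor the rest
theorem skip_sel_lemma (cs : List Char) :
    PySem.Chars.strip (aSel cs).1 = PySem.Chars.strip (aSel (aSkip cs)).1
      ∧ (aSel cs).2 = (aSel (aSkip cs)).2 := by
  induction cs with
  | nil => simp [aSkip]
  | cons c r ih =>
    by_cases hs : PySem.Chars.isspace c = true
    · have hc : c ≠ '{' := by
        intro h; subst h; exact absurd hs (by decide)
      simp only [aSkip, hs, if_true, aSel, hc, if_false]
      exact ⟨(strip_cons_space c _ hs).trans ih.1, ih.2⟩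
    · have hs' : PySem.Chars.isspace c = false := by simp_all
      simp [aSkip, hs']

-- B's body mode replays A's body loop; at end of input inside a block B emits the full
-- stripped buffer, after a closing '}' both drop the brace.
theorem body_lemma (cs : List Char) : ∀ (sel buf : List Char) (depth : Int) (q : Option Char)
    (e : Bool), 1 ≤ depth →
    bStep (.inbody sel buf depth q e) cs
      = if aBodyEOF cs depth q e = true then
          bEmit sel (PySem.Chars.strip (buf ++ (aBody cs depth q e).1))
        else
          bEmit sel (PySem.Chars.strip ((buf ++ (aBody cs depth q e).1).dropLast))
            ++ bStep .seek (aBody cs depth q e).2 := by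
  induction cs with
  | nil =>
    intro sel buf depth q e hd
    have : aBodyEOF [] depth q e = true := by simp [aBodyEOF]; omega
    simp [bStep, aBody, this]
  | cons c r ih =>
    intro sel buf depth q e hd
    have hd0 : ¬ (depth ≤ 0) := by omega
    match q with
    | some qc =>
      simp only [bStep, aBody, aBodyEOF, hd0, if_false]
      rw [ih _ _ _ _ _ hd]
      simp [List.append_assoc]
    | none =>
      simp only [bStep, aBody, aBodyEOF, hd0, if_false]
      by_cases hq : c = '"' ∨ c = '\''
      · simp only [hq, if_true]
        rw [ih _ _ _ _ _ hd]
        simp [List.append_assoc]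
      · simp only [hq, if_false]
        by_cases ho : c = '{'
        · simp only [ho, if_true]
          rw [ih _ _ _ _ _ (by omega : (1:Int) ≤ depth + 1)]
          simp [List.append_assoc]
        · simp only [ho, if_false]
          by_cases hc : c = '}'
          · simp only [hc, if_true]
            by_cases h1 : depth - 1 = 0
            · simp only [h1, if_true]
              rw [aBodyEOF_nonpos r 0 none e (by omega), aBody_nonpos r 0 none e (by omega)]
              simp
            · simp only [h1, if_false]
              rw [ih _ _ _ _ _ (by omega : (1:Int) ≤ depth - 1)]
              simp [List.append_assoc]
          · simp only [hc, if_false]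
            rw [ih _ _ _ _ _ hd]
            simp [List.append_assoc]

-- B's selector mode replays A's selector scan
theorem sel_lemma (cs : List Char) : ∀ acc : List Char,
    bStep (.insel acc) cs
      = if (aSel cs).2 = [] then []
        else bStep (.inbody (PySem.Chars.strip (acc ++ (aSel cs).1)) [] 1 none false)
          (aSel cs).2.tail := by
  induction cs with
  | nil => intro acc; simp [bStep, aSel]
  | cons c r ih =>
    intro acc
    by_cases hc : c = '{'
    · simp [bStep, aSel, hc]
    · simp only [bStep, aSel, hc, if_false]
      rw [ih (acc ++ [c])]
      simp [List.append_assoc]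

-- B's seek mode replays A's whitespace skip
theorem seek_lemma (cs : List Char) :
    bStep .seek cs
      = match aSkip cs with
        | [] => []
        | c :: r =>
          if c = '{' then bStep (.inbody [] [] 1 none false) r
          else bStep (.insel [c]) r := by
  induction cs with
  | nil => simp [bStep, aSkip]
  | cons c r ih =>
    by_cases hs : PySem.Chars.isspace c = true
    · simp only [bStep, hs, if_true, aSkip]
      exact ih
    · have hs' : PySem.Chars.isspace c = false := by simp_all
      simp [bStep, aSkip, hs']

-- D_'s fold through A's selector scan …
theorem dtop_lemma (cs : List Char) : ∀ acc : List Char,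
    dJudge (List.foldl dStep
        (false, !(PySem.Chars.strip acc).isEmpty, false, 0, none, false) cs)
      = if (aSel cs).2 = [] then false
        else dJudge (List.foldl dStep
            (true, !(PySem.Chars.strip (acc ++ (aSel cs).1)).isEmpty, false, 1, none, false)
            (aSel cs).2.tail) := by
  induction cs with
  | nil => intro acc; simp [aSel, dJudge]
  | cons c r ih =>
    intro acc
    simp only [List.foldl_cons]
    by_cases hb : c = '{'
    · subst hb
      simp [dStep, aSel]
    · have hstep : dStep (false, !(PySem.Chars.strip acc).isEmpty, false, 0, none, false) c
          = (false, !(PySem.Chars.strip (acc ++ [c])).isEmpty, false, 0, none, false) := by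
        rw [dStep]
        simp only [hb, beq_iff_eq, if_false]
        rw [seen_append]
      rw [hstep, ih (acc ++ [c])]
      simp [aSel, hb, List.append_assoc]

-- … and through A's body scan
theorem dbody_lemma (cs : List Char) : ∀ (sne lns : Bool) (d : Int) (q : Option Char)
    (e : Bool), 1 ≤ d → (q = none → e = false) →
    dJudge (List.foldl dStep (true, sne, lns, d, q, e) cs)
      = if aBodyEOF cs d q e = true then sne && lastFlag lns cs
        else dJudge (List.foldl dStep (false, false, false, 0, none, false)
            (aBody cs d q e).2) := by
  induction cs with
  | nil =>
    intro sne lns d q e hd _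
    have hE : aBodyEOF [] d q e = true := by simp [aBodyEOF]; omega
    simp [hE, dJudge, lastFlag]
  | cons c r ih =>
    intro sne lns d q e hd hqe
    have hd0 : ¬ (d ≤ 0) := by omega
    simp only [List.foldl_cons]
    cases q with
    | some qc =>
      cases e with
      | true =>
        have h1 : dStep (true, sne, lns, d, some qc, true) c
            = (true, sne, !PySem.Chars.isspace c, d, some qc, false) := by
          simp [dStep]
        have h2 : aBody (c :: r) d (some qc) true
            = (c :: (aBody r d (some qc) false).1, (aBody r d (some qc) false).2) := by
          simp [aBody, hd0]
        have h3 : aBodyEOF (c :: r) d (some qc) true = aBodyEOF r d (some qc) false := by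
          simp [aBodyEOF, hd0]
        rw [h1, h2, h3, ih _ _ _ _ _ hd (by simp)]
        simp [lastFlag]
      | false =>
        by_cases hbk : c = '\\'
        · subst hbk
          have h1 : dStep (true, sne, lns, d, some qc, false) '\\'
              = (true, sne, !PySem.Chars.isspace '\\', d, some qc, true) := by
            simp [dStep]
          have h2 : aBody ('\\' :: r) d (some qc) false
              = ('\\' :: (aBody r d (some qc) true).1, (aBody r d (some qc) true).2) := by
            simp [aBody, hd0]
          have h3 : aBodyEOF ('\\' :: r) d (some qc) false = aBodyEOF r d (some qc) true := by
            simp [aBodyEOF, hd0]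
          rw [h1, h2, h3, ih _ _ _ _ _ hd (by simp)]
          simp [lastFlag]
        · by_cases hce : c = qc
          · subst hce
            have h1 : dStep (true, sne, lns, d, some c, false) c
                = (true, sne, !PySem.Chars.isspace c, d, none, false) := by
              simp [dStep, hbk]
            have h2 : aBody (c :: r) d (some c) false
                = (c :: (aBody r d none false).1, (aBody r d none false).2) := by
              simp [aBody, hd0, hbk]
            have h3 : aBodyEOF (c :: r) d (some c) false = aBodyEOF r d none false := by
              simp [aBodyEOF, hd0, hbk]
            rw [h1, h2, h3, ih _ _ _ _ _ hd (by simp)]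
            simp [lastFlag]
          · have h1 : dStep (true, sne, lns, d, some qc, false) c
                = (true, sne, !PySem.Chars.isspace c, d, some qc, false) := by
              simp [dStep, hbk, hce]
            have h2 : aBody (c :: r) d (some qc) false
                = (c :: (aBody r d (some qc) false).1, (aBody r d (some qc) false).2) := by
              simp [aBody, hd0, hbk, hce]
            have h3 : aBodyEOF (c :: r) d (some qc) false = aBodyEOF r d (some qc) false := by
              simp [aBodyEOF, hd0, hbk, hce]
            rw [h1, h2, h3, ih _ _ _ _ _ hd (by simp)]
            simp [lastFlag]
    | none =>
      have he : e = false := hqe rfl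
      subst he
      by_cases hq : c = '"' ∨ c = '\''
      · have hcb : c ≠ '}' := by rcases hq with h | h <;> subst h <;> decide
        have hco : c ≠ '{' := by rcases hq with h | h <;> subst h <;> decide
        have h1 : dStep (true, sne, lns, d, none, false) c
            = (true, sne, !PySem.Chars.isspace c, d, some c, false) := by
          rcases hq with h | h <;> subst h <;> simp [dStep]
        have hns : (!PySem.Chars.isspace c) = true := by
          rcases hq with h | h <;> subst h <;> decide
        have h2 : aBody (c :: r) d none false
            = (c :: (aBody r d (some c) false).1, (aBody r d (some c) false).2) := by
          simp [aBody, hd0, hq]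
        have h3 : aBodyEOF (c :: r) d none false = aBodyEOF r d (some c) false := by
          simp [aBodyEOF, hd0, hq]
        rw [h1, h2, h3, ih _ _ _ _ _ hd (by simp)]
        simp [lastFlag, hns]
      · by_cases ho : c = '{'
        · subst ho
          have h1 : dStep (true, sne, lns, d, none, false) '{'
              = (true, sne, !PySem.Chars.isspace '{', d + 1, none, false) := by
            simp [dStep]
          have h2 : aBody ('{' :: r) d none false
              = ('{' :: (aBody r (d + 1) none false).1, (aBody r (d + 1) none false).2) := by
            simp [aBody, hd0]
          have h3 : aBodyEOF ('{' :: r) d none false = aBodyEOF r (d + 1) none false := by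
            simp [aBodyEOF, hd0]
          rw [h1, h2, h3, ih _ _ _ _ _ (by omega) (by simp)]
          simp [lastFlag, show (!PySem.Chars.isspace '{') = true from by decide]
        · by_cases hc : c = '}'
          · subst hc
            have h2 : aBody ('}' :: r) d none false
                = ('}' :: (aBody r (d - 1) none false).1, (aBody r (d - 1) none false).2) := by
              simp [aBody, hd0]
            have h3 : aBodyEOF ('}' :: r) d none false = aBodyEOF r (d - 1) none false := by
              simp [aBodyEOF, hd0]
            by_cases h1d : d = 1
            · subst h1d
              have h1 : dStep (true, sne, lns, 1, none, false) '}'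
                  = (false, false, false, 0, none, false) := by
                simp [dStep]
              rw [h1, h2, h3, aBodyEOF_nonpos r (1 - 1) none false (by omega),
                aBody_nonpos r (1 - 1) none false (by omega)]
              simp
            · have h1 : dStep (true, sne, lns, d, none, false) '}'
                  = (true, sne, !PySem.Chars.isspace '}', d - 1, none, false) := by
                simp [dStep, h1d, Int.sub_eq_add_neg]
              rw [h1, h2, h3, ih _ _ _ _ _ (by omega) (by simp)]
              simp [lastFlag, show (!PySem.Chars.isspace '}') = true from by decide]
          · have h1 : dStep (true, sne, lns, d, none, false) c
                = (true, sne, !PySem.Chars.isspace c, d, none, false) := by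
              have h4 : c ≠ '"' := fun hx => hq (Or.inl hx)
              have h5 : c ≠ '\'' := fun hx => hq (Or.inr hx)
              simp [dStep, hc, ho, h4, h5]
            have h2 : aBody (c :: r) d none false
                = (c :: (aBody r d none false).1, (aBody r d none false).2) := by
              simp [aBody, hd0, hq, ho, hc]
            have h3 : aBodyEOF (c :: r) d none false = aBodyEOF r d none false := by
              simp [aBodyEOF, hd0, hq, ho, hc]
            rw [h1, h2, h3, ih _ _ _ _ _ hd (by simp)]
            simp [lastFlag]

-- A = B on every input whose scan does not end inside an unterminated block that
-- triggers A's truncating slice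
theorem main_lemma : ∀ (n : Nat) (cs : List Char), cs.length ≤ n →
    dJudge (List.foldl dStep (false, false, false, 0, none, false) cs) ≠ true →
    aLoop cs = bStep .seek cs := by
  intro n
  induction n with
  | zero =>
    intro cs hlen _
    have : cs = [] := by cases cs <;> simp_all
    subst this
    simp [aLoop, aSkip, bStep]
  | succ n ih =>
    intro cs hlen hD
    rw [aLoop, seek_lemma]
    have hk := aSkip_len cs
    have hchain := dtop_lemma cs []
    rw [show (!(PySem.Chars.strip ([] : List Char)).isEmpty) = false from by decide] at hchain
    have hss := skip_sel_lemma cs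
    cases hsk : aSkip cs with
    | nil => simp
    | cons c1 r1 =>
      have hr1 : r1.length ≤ n := by
        have := hsk ▸ hk; simp at this; omega
      simp only [reduceCtorEq, dite_false]
      by_cases hc1 : c1 = '{'
      · -- empty selector: A swallows the body and continues; B goes straight to body mode
        subst hc1
        rw [hsk] at hss
        have hA : aSel ('{' :: r1) = ([], '{' :: r1) := by simp [aSel]
        have hstrip : PySem.Chars.strip ([] : List Char) = [] := by decide
        rw [hchain] at hD
        rw [hss.2, hA] at hD
        simp only [reduceCtorEq, if_false, List.tail_cons, List.nil_append] at hD
        rw [hss.1, hA] at hD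
        simp only [hstrip, List.isEmpty_nil, Bool.not_true] at hD
        rw [dbody_lemma r1 false false 1 none false (by omega) (by simp)] at hD
        simp only [hA, reduceCtorEq, dite_false, if_true, List.tail_cons, hstrip]
        rw [body_lemma r1 [] [] 1 none false (by omega)]
        have hb := aBody_len r1 1 none false
        by_cases hEOF : aBodyEOF r1 1 none false = true
        · -- unterminated body with empty selector: both emit nothing
          rw [aBodyEOF_consumes r1 1 none false hEOF]
          simp [hEOF, bEmit, aLoop, aSkip]
        · simp only [hEOF] at hD ⊢
          rw [ih _ (le_trans hb hr1) hD]
          simp [bEmit]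
      · rw [hsk] at hss
        have hA : aSel (c1 :: r1) = (c1 :: (aSel r1).1, (aSel r1).2) := by
          simp [aSel, hc1]
        simp only [hc1, if_false]
        rw [sel_lemma r1 [c1]]
        rw [hchain] at hD
        rw [hss.2, hA] at hD
        cases hq : (aSel r1).2 with
        | nil => simp [hA, hq]
        | cons x r2 =>
          have hr2 : r2.length ≤ n := by
            have := aSel_len r1
            rw [hq] at this
            simp at this
            omega
          have hb := aBody_len r2 1 none false
          simp only [hq, reduceCtorEq, if_false, List.tail_cons, List.nil_append] at hD
          rw [hss.1, hA] at hD
          rw [dbody_lemma r2 _ false 1 none false (by omega) (by simp)] at hD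
          simp only [hA, hq, reduceCtorEq, dite_false, if_false, List.tail_cons,
            List.singleton_append]
          rw [body_lemma r2 (PySem.Chars.strip (c1 :: (aSel r1).1)) [] 1 none false (by omega)]
          by_cases hEOF : aBodyEOF r2 1 none false = true
          · -- unterminated body: outside D_ the truncated and full bodies strip equal
            simp only [hEOF, if_true] at hD ⊢
            rw [aBodyEOF_consumes r2 1 none false hEOF]
            simp only [List.nil_append]
            have hloopnil : aLoop [] = [] := by simp [aLoop, aSkip]
            by_cases hsel : PySem.Chars.strip (c1 :: (aSel r1).1) = []
            · simp [hsel, hloopnil, bEmit]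
            · have hsne : (!(PySem.Chars.strip (c1 :: (aSel r1).1)).isEmpty) = true := by
                simp [hsel]
              rw [hsne] at hD
              have hlf : lastFlag false r2 = false := by
                cases hx : lastFlag false r2
                · rfl
                · exact absurd (by rw [hx]; rfl) hD
              have hstripEq := strip_dropLast_of_lastFlag r2 false hlf
              rw [hstripEq]
              by_cases hbody : PySem.Chars.strip r2 = []
              · simp [hbody, hloopnil, bEmit]
              · simp [hbody, hloopnil, bEmit, hsel]
          · simp only [hEOF] at hD ⊢
            rw [ih _ (le_trans hb hr2) hD]
            simp only [List.nil_append]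
            by_cases hsel : PySem.Chars.strip (c1 :: (aSel r1).1) = []
            · simp [hsel, bEmit]
            · simp only [hsel, if_false]
              by_cases hbody :
                  PySem.Chars.strip (aBody r2 1 none false).1.dropLast = []
              · simp [hbody, bEmit]
              · simp [hbody, bEmit, hsel]

-- inside D_ the two programs differ on the last, unterminated block
theorem main_ne : ∀ (n : Nat) (cs : List Char), cs.length ≤ n →
    dJudge (List.foldl dStep (false, false, false, 0, none, false) cs) = true →
    aLoop cs ≠ bStep .seek cs := by
  intro n
  induction n with
  | zero =>
    intro cs hlen hD
    have : cs = [] := by cases cs <;> simp_all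
    subst this
    simp [dJudge] at hD
  | succ n ih =>
    intro cs hlen hD
    rw [aLoop, seek_lemma]
    have hk := aSkip_len cs
    have hchain := dtop_lemma cs []
    rw [show (!(PySem.Chars.strip ([] : List Char)).isEmpty) = false from by decide] at hchain
    have hss := skip_sel_lemma cs
    cases hsk : aSkip cs with
    | nil =>
      -- all-whitespace input: the scan ends outside any block, contradicting hD
      rw [hchain] at hD
      rw [hss.2, hsk] at hD
      simp [aSel] at hD
    | cons c1 r1 =>
      have hr1 : r1.length ≤ n := by
        have := hsk ▸ hk; simp at this; omega
      simp only [reduceCtorEq, dite_false]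
      by_cases hc1 : c1 = '{'
      · -- empty selector: no block with a nonempty selector can end here unterminated
        subst hc1
        rw [hsk] at hss
        have hA : aSel ('{' :: r1) = ([], '{' :: r1) := by simp [aSel]
        have hstrip : PySem.Chars.strip ([] : List Char) = [] := by decide
        rw [hchain] at hD
        rw [hss.2, hA] at hD
        simp only [reduceCtorEq, if_false, List.tail_cons, List.nil_append] at hD
        rw [hss.1, hA] at hD
        simp only [hstrip, List.isEmpty_nil, Bool.not_true] at hD
        rw [dbody_lemma r1 false false 1 none false (by omega) (by simp)] at hD
        simp only [hA, reduceCtorEq, dite_false, if_true, List.tail_cons, hstrip]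
        rw [body_lemma r1 [] [] 1 none false (by omega)]
        have hb := aBody_len r1 1 none false
        by_cases hEOF : aBodyEOF r1 1 none false = true
        · rw [hEOF] at hD
          simp at hD
        · simp only [hEOF] at hD ⊢
          have := ih _ (le_trans hb hr1) hD
          simpa [bEmit] using this
      · rw [hsk] at hss
        have hA : aSel (c1 :: r1) = (c1 :: (aSel r1).1, (aSel r1).2) := by
          simp [aSel, hc1]
        simp only [hc1, if_false]
        rw [sel_lemma r1 [c1]]
        rw [hchain] at hD
        rw [hss.2, hA] at hD
        cases hq : (aSel r1).2 with
        | nil => rw [hq] at hD; simp at hD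
        | cons x r2 =>
          have hr2 : r2.length ≤ n := by
            have := aSel_len r1
            rw [hq] at this
            simp at this
            omega
          have hb := aBody_len r2 1 none false
          simp only [hq, reduceCtorEq, if_false, List.tail_cons, List.nil_append] at hD
          rw [hss.1, hA] at hD
          rw [dbody_lemma r2 _ false 1 none false (by omega) (by simp)] at hD
          simp only [hA, hq, reduceCtorEq, dite_false, if_false, List.tail_cons,
            List.singleton_append]
          rw [body_lemma r2 (PySem.Chars.strip (c1 :: (aSel r1).1)) [] 1 none false (by omega)]
          by_cases hEOF : aBodyEOF r2 1 none false = true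
          · -- the unterminated block: A's truncated body differs from B's full body
            simp only [hEOF, if_true] at hD ⊢
            rw [aBodyEOF_consumes r2 1 none false hEOF]
            simp only [List.nil_append]
            have hloopnil : aLoop [] = [] := by simp [aLoop, aSkip]
            rw [Bool.and_eq_true] at hD
            obtain ⟨hs1, hlf⟩ := hD
            have hsel : PySem.Chars.strip (c1 :: (aSel r1).1) ≠ [] := by
              intro h0; rw [h0] at hs1; simp at hs1
            obtain ⟨hne, hnn⟩ := strip_strict r2 hlf
            simp only [hloopnil, hsel, if_false]
            by_cases hbody : PySem.Chars.strip r2.dropLast = []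
            · simp [hbody, bEmit, hsel, hnn]
            · simp only [hbody, if_false]
              intro hEq
              simp [bEmit, hsel, hnn] at hEq
              have := congrArg String.toList hEq
              simp at this
              exact hne this
          · simp only [hEOF] at hD ⊢
            have ihne := ih _ (le_trans hb hr2) hD
            simp only [List.nil_append]
            by_cases hsel : PySem.Chars.strip (c1 :: (aSel r1).1) = []
            · simpa [hsel, bEmit] using ihne
            · simp only [hsel, if_false]
              by_cases hbody :
                  PySem.Chars.strip (aBody r2 1 none false).1.dropLast = []
              · simpa [hbody, bEmit] using ihne
              · simpa [hbody, bEmit, hsel] using ihne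

theorem aLoop_nil : aLoop [] = [] := by
  rw [aLoop.eq_def]; simp [aSkip]

theorem aLoop_witness : aLoop ['a', '{', 'x', ':', ' ', 'y'] = [("a", "x:")] := by
  rw [aLoop.eq_def]
  simp only [show aSkip ['a', '{', 'x', ':', ' ', 'y'] = ['a', '{', 'x', ':', ' ', 'y'] from by decide,
    show aSel ['a', '{', 'x', ':', ' ', 'y'] = (['a'], ['{', 'x', ':', ' ', 'y']) from by decide,
    List.tail_cons,
    show aBody ['x', ':', ' ', 'y'] 1 none false = (['x', ':', ' ', 'y'], []) from by decide,
    aLoop_nil]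
  decide

-- ===== VERDICT (by name: the statements are the Claim_ definitions above) =====
theorem iter_rule_blocks_py_spec : Claim_unchanged_iter_rule_blocks_py := by
  intro source _ hD
  exact main_lemma source.toList.length source.toList (Nat.le_refl _) hD

theorem iter_rule_blocks_py_changed : Claim_changed_iter_rule_blocks_py := by
  unfold Claim_changed_iter_rule_blocks_py
  refine ⟨by decide, by decide, ?_, by decide, by decide⟩
  show iter_rule_blocks_py "a{x: y" = _
  have hT : ("a{x: y" : String).toList = ['a', '{', 'x', ':', ' ', 'y'] := by decide
  simpa [iter_rule_blocks_py, hT, pvDiffWitnessOut_iter_rule_blocks_py] using aLoop_witness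

theorem iter_rule_blocks_py_tight : Claim_exact_iter_rule_blocks_py := by
  intro source _ hD
  exact main_ne source.toList.length source.toList (Nat.le_refl _) hD
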